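-- pv_equiv track=rewrite | github.com/diniali0211/Sustioclaim | sustioclaim.py | reorder_day_cols
-- ===== SOURCE A (Python) =====
-- def reorder_day_cols(cols):
--     nums = []
--     for c in cols:
--         try:
--             n = int(str(c).strip())
--             if 1 <= n <= 31: nums.append(n)
--         except: pass
--     nums = sorted(set(nums))
--     return [str(d) for d in range(16,32) if d in nums] + [str(d) for d in range(1,16) if d in nums]
-- ===== SOURCE B (Python) =====
-- def reorder_day_cols(cols):
--     days = set()
--     for c in cols:
--         try:
--             n = int(str(c).strip())
--         except:
--             pass
--         else:
--             if 1 <= n <= 31: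
--                 days.add(n)
--     # one sort with a rotated key: 16..31 get keys 0..15, 1..15 get keys 16..30
--     return [str(d) for d in sorted(days, key=lambda d: (d - 16) % 31)]
-- ===== Notes on version B (the rewrite author's own statement) =====
-- stated objective: simpler
-- what changed: B replaces A's two fixed-range scans (16..31 then 1..15) with membership tests by a single sort of the collected day set under the rotated key (d-16)%31, which directly yields the 16-first ordering.
import Mathlib
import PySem

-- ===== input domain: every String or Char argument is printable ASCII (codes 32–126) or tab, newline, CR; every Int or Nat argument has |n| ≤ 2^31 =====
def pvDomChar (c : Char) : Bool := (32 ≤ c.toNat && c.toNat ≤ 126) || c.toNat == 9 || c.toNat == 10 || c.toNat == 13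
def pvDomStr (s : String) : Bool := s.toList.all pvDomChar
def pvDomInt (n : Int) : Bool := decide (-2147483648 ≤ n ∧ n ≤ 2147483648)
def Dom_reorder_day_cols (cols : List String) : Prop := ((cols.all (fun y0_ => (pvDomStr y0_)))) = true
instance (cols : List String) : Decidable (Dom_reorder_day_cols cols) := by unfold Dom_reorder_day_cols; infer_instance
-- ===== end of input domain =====

-- B replaces A's two fixed-range scans with one sort of the day set under the rotated key (d-16)%31 (simpler decomposition).

-- ===== PORT A =====
-- A's loop body: parse int(str(c).strip()); ValueError (none) = except: pass; append if 1<=n<=31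
def pvStepA (acc : List Int) (c : String) : List Int :=
  match PySem.Int.ofStr? (PySem.Str.strip c) with
  | none => acc
  | some n => if 1 ≤ n ∧ n ≤ 31 then acc ++ [n] else acc

def reorder_day_cols (cols : List String) : List String :=
  let nums := cols.foldl pvStepA []
  let nums2 := PySem.List.sorted (PySem.Set.ofList nums) (fun x => x) false
  ((PySem.List.pyRange 16 32 1).filter (fun d => decide (d ∈ nums2))).map PySem.Int.toStr
    ++ ((PySem.List.pyRange 1 16 1).filter (fun d => decide (d ∈ nums2))).map PySem.Int.toStr

-- ===== PORT B =====
-- B's loop body: same parse, but adds valid days straight into a set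
def pvStepB (s : PySem.Set Int) (c : String) : PySem.Set Int :=
  match PySem.Int.ofStr? (PySem.Str.strip c) with
  | none => s
  | some n => if 1 ≤ n ∧ n ≤ 31 then PySem.Set.add s n else s

-- the rotated sort key (d - 16) % 31
def pvKeyB (d : Int) : Int := PySem.Int.mod (d - 16) 31

def reorder_day_cols_alt (cols : List String) : List String :=
  let days := cols.foldl pvStepB PySem.Set.empty
  (PySem.List.sorted days pvKeyB false).map PySem.Int.toStr

-- ===== PRECONDITION & SPEC =====
def Spec_reorder_day_cols (cols : List String) (out : List String) : Prop := out = reorder_day_cols_alt cols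
instance (cols : List String) (out : List String) : Decidable (Spec_reorder_day_cols cols out) := by unfold Spec_reorder_day_cols; infer_instance

-- ===== CLAIM (what is proved, stated in full; the proofs are below) =====
def Claim_equal_reorder_day_cols : Prop := ∀ (cols : List String), Dom_reorder_day_cols cols → Spec_reorder_day_cols cols (reorder_day_cols cols)

-- ===== LEMMAS AND PROOFS =====

-- B's fold is A's fold viewed through Set.ofList
theorem pv_fold_eq (cols : List String) (acc : List Int) :
    cols.foldl pvStepB (PySem.Set.ofList acc) = PySem.Set.ofList (cols.foldl pvStepA acc) := by
  induction cols generalizing acc with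
  | nil => rfl
  | cons c cs ih =>
    have hstep : pvStepB (PySem.Set.ofList acc) c = PySem.Set.ofList (pvStepA acc c) := by
      unfold pvStepA pvStepB
      cases PySem.Int.ofStr? (PySem.Str.strip c) with
      | none => rfl
      | some n =>
        dsimp only
        by_cases h : 1 ≤ n ∧ n ≤ 31
        · rw [if_pos h, if_pos h, PySem.Set.ofList_eq_foldl,
            PySem.Set.ofList_eq_foldl, List.foldl_append]
          rfl
        · rw [if_neg h, if_neg h]
    simp only [List.foldl_cons, hstep, ih]

-- every collected day is in 1..31
theorem pv_fold_bound (cols : List String) (acc : List Int)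
    (h : ∀ x ∈ acc, 1 ≤ x ∧ x ≤ 31) :
    ∀ x ∈ cols.foldl pvStepA acc, 1 ≤ x ∧ x ≤ 31 := by
  induction cols generalizing acc with
  | nil => exact h
  | cons c cs ih =>
    rw [List.foldl_cons]
    refine ih _ ?_
    unfold pvStepA
    cases PySem.Int.ofStr? (PySem.Str.strip c) with
    | none => exact h
    | some n =>
      dsimp only
      by_cases hn : 1 ≤ n ∧ n ≤ 31
      · rw [if_pos hn]
        intro x hx
        rcases List.mem_append.mp hx with hx | hx
        · exact h x hx
        · simp at hx; omega
      · rw [if_neg hn]; exact h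

-- the rotated key, evaluated on valid days
theorem pv_key_eval (d : Int) (h1 : 1 ≤ d) (h2 : d ≤ 31) :
    pvKeyB d = if 16 ≤ d then d - 16 else d + 15 := by
  unfold pvKeyB PySem.Int.mod
  rw [Int.fmod_eq_emod, if_pos (Or.inl (by norm_num))]
  split_ifs <;> omega

-- ===== VERDICT (by name: the statement is the Claim_ definition above) =====
theorem reorder_day_cols_spec : Claim_equal_reorder_day_cols := by
  intro cols _
  unfold Spec_reorder_day_cols reorder_day_cols reorder_day_cols_alt
  set numsA := cols.foldl pvStepA [] with hnumsA
  have hseen : List.foldl pvStepB PySem.Set.empty cols = PySem.Set.ofList numsA :=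
    pv_fold_eq cols []
  set nums2 := PySem.List.sorted (PySem.Set.ofList numsA) (fun x => x) false with hn2
  have hbound : ∀ x ∈ (PySem.Set.ofList numsA : List Int), 1 ≤ x ∧ x ≤ 31 := by
    intro x hx
    exact pv_fold_bound cols [] (by simp) x ((PySem.Set.mem_ofList _ _).mp hx)
  have hmem2 : ∀ x : Int, x ∈ nums2 ↔ x ∈ (PySem.Set.ofList numsA : List Int) := by
    intro x; exact PySem.List.mem_sorted _ _ _ _
  set Rh := (PySem.List.pyRange 16 32 1).filter (fun d => decide (d ∈ nums2)) with hRh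
  set Rl := (PySem.List.pyRange 1 16 1).filter (fun d => decide (d ∈ nums2)) with hRl
  have hRhmem : ∀ x : Int, x ∈ Rh ↔ (16 ≤ x ∧ x < 32) ∧ x ∈ nums2 := by
    intro x; rw [hRh]
    simp [List.mem_filter, PySem.List.mem_pyRange_one]
  have hRlmem : ∀ x : Int, x ∈ Rl ↔ (1 ≤ x ∧ x < 16) ∧ x ∈ nums2 := by
    intro x; rw [hRl]
    simp [List.mem_filter, PySem.List.mem_pyRange_one]
  -- (Rh ++ Rl) is a permutation of the set
  have hperm : (Rh ++ Rl).Perm (PySem.Set.ofList numsA) := by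
    have hnh : Rh.Nodup := (PySem.List.nodup_pyRange_one 16 32).filter _
    have hnl : Rl.Nodup := (PySem.List.nodup_pyRange_one 1 16).filter _
    have hnd : (Rh ++ Rl).Nodup := by
      rw [List.nodup_append]
      refine ⟨hnh, hnl, ?_⟩
      intro a ha b hb
      have h1 := (hRhmem a).mp ha
      have h2 := (hRlmem b).mp hb
      intro he; omega
    refine (List.perm_ext_iff_of_nodup hnd (PySem.Set.nodup_ofList _)).mpr ?_
    intro a
    rw [List.mem_append, hRhmem, hRlmem, ← hmem2 a]
    constructor
    · rintro (⟨_, h⟩ | ⟨_, h⟩) <;> exact h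
    · intro h
      have hb := hbound a ((hmem2 a).mp h)
      by_cases h16 : 16 ≤ a
      · exact Or.inl ⟨⟨h16, by omega⟩, h⟩
      · exact Or.inr ⟨⟨by omega, by omega⟩, h⟩
  -- (Rh ++ Rl) is strictly increasing under the rotated key
  have hpw : (Rh ++ Rl).Pairwise (fun a b => pvKeyB a < pvKeyB b) := by
    rw [List.pairwise_append]
    refine ⟨?_, ?_, ?_⟩
    · have h0 : Rh.Pairwise (· < ·) := (PySem.List.pairwise_lt_pyRange_one 16 32).filter _
      rw [List.pairwise_iff_forall_sublist] at h0 ⊢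
      intro a b hsub
      have ha := (hRhmem a).mp (hsub.subset (by simp))
      have hb := (hRhmem b).mp (hsub.subset (by simp))
      have hab := h0 hsub
      have hba := hbound b ((hmem2 b).mp hb.2)
      rw [pv_key_eval a (by omega) (by omega), pv_key_eval b (by omega) (by omega)]
      simp only [if_pos ha.1.1, if_pos hb.1.1]; omega
    · have h0 : Rl.Pairwise (· < ·) := (PySem.List.pairwise_lt_pyRange_one 1 16).filter _
      rw [List.pairwise_iff_forall_sublist] at h0 ⊢
      intro a b hsub
      have ha := (hRlmem a).mp (hsub.subset (by simp))
      have hb := (hRlmem b).mp (hsub.subset (by simp))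
      have hab := h0 hsub
      rw [pv_key_eval a (by omega) (by omega), pv_key_eval b (by omega) (by omega)]
      rw [if_neg (by omega), if_neg (by omega)]; omega
    · intro a ha b hb
      have h1 := (hRhmem a).mp ha
      have h2 := (hRlmem b).mp hb
      rw [pv_key_eval a (by omega) (by omega), pv_key_eval b (by omega) (by omega)]
      rw [if_pos (by omega), if_neg (by omega)]; omega
  have hsorted : PySem.List.sorted (PySem.Set.ofList numsA) pvKeyB false = Rh ++ Rl :=
    PySem.List.sorted_eq_of_perm_of_pairwise_lt _ _ pvKeyB hperm hpw
  simp only [hseen, hsorted, List.map_append]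
  rw [← hn2, ← hRh, ← hRl]
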